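-- pv_equiv track=rewrite | github.com/MarkoZdilar/Graph_Algorithms-Python | Vj3/zdilar_marko_3.py | twoOnesInARow
-- ===== SOURCE A (Python) =====
-- def twoOnesInARow(matrix):
--     for row in matrix:
--         numberOfOnes = 0
--         for number in row:
--             if(number == 1):
--                 numberOfOnes +=1
--             elif(number != 0):
--                 return False
--         if(numberOfOnes != 2):
--             return False
--     return True
-- ===== SOURCE B (Python) =====
-- def twoOnesInARow(matrix):
--     return all(row.count(1) == 2 and row.count(0) == len(row) - 2
--                for row in matrix)
-- ===== Notes on version B (the rewrite author's own statement) =====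
-- stated objective: simpler
-- what changed: Drops the validity scan and ones accumulator entirely: a row is accepted iff row.count(1) == 2 and row.count(0) == len(row) - 2, which by a counting argument is equivalent to 'binary with exactly two ones'.
import Mathlib
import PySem

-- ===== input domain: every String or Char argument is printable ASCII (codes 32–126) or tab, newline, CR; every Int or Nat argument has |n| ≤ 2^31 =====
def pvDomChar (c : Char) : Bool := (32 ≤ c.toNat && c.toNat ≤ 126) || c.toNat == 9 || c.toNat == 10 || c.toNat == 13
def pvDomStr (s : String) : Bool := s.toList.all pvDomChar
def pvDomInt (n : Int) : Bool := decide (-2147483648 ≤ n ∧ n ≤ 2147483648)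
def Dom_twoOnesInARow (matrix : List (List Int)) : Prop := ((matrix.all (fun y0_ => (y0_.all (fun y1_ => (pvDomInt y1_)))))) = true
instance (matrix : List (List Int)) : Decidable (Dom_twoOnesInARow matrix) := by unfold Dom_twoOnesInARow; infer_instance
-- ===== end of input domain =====

-- B drops A's validity scan and ones accumulator: it accepts a row iff it has exactly two 1s and all remaining entries are 0, expressed purely through element counts; simpler, same cost.

-- ===== PORT A =====
-- inner loop of A: counts ones in a row, `none` models the early `return False` on a non-binary element
def pvCountOnes : List Int → Int → Option Int
  | [], acc => some acc
  | n :: rest, acc =>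
    if n == 1 then pvCountOnes rest (acc + 1)
    else if n != 0 then none
    else pvCountOnes rest acc

def twoOnesInARow : List (List Int) → Bool
  | [] => true
  | row :: rest =>
    match pvCountOnes row 0 with
    | none => false
    | some c => if c != 2 then false else twoOnesInARow rest

-- ===== PORT B =====
def twoOnesInARow_alt (matrix : List (List Int)) : Bool :=
  matrix.all (fun row =>
    ((PySem.List.count row 1 : Int) == 2) &&
    ((PySem.List.count row 0 : Int) == (row.length : Int) - 2))

-- ===== PRECONDITION & SPEC =====
def Spec_twoOnesInARow (matrix : List (List Int)) (out : Bool) : Prop := out = twoOnesInARow_alt matrix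
instance (matrix : List (List Int)) (out : Bool) : Decidable (Spec_twoOnesInARow matrix out) := by unfold Spec_twoOnesInARow; infer_instance

-- ===== CLAIM =====
def Claim_equal_twoOnesInARow : Prop := ∀ (matrix : List (List Int)), Dom_twoOnesInARow matrix → Spec_twoOnesInARow matrix (twoOnesInARow matrix)

-- ===== LEMMAS AND PROOFS =====

-- A's ones counter: on a binary row it returns acc + (number of 1s), otherwise none
theorem pvCountOnes_char (row : List Int) (acc : Int) :
    pvCountOnes row acc =
      (if row.all (fun x => x == 0 || x == 1) then some (acc + (row.count 1 : Int)) else none) := by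
  induction row generalizing acc with
  | nil => simp [pvCountOnes]
  | cons n rest ih =>
    by_cases h1 : n = 1
    · subst h1
      simp [pvCountOnes, ih]
      split <;> [push_cast; skip] <;> ring_nf
    · by_cases h0 : n = 0
      · subst h0
        simp [pvCountOnes, ih, h1]
      · simp [pvCountOnes, h0, h1]

-- counting argument: all entries binary ↔ the 0s and 1s exhaust the row
theorem counts_le (l : List Int) : l.count 0 + l.count 1 ≤ l.length := by
  induction l with
  | nil => simp
  | cons m tl ih =>
    by_cases hm0 : m = 0 <;> by_cases hm1 : m = 1 <;>
      simp [List.count_cons, hm0, hm1] <;> omega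

-- counting argument: all entries binary ↔ the 0s and 1s exhaust the row
theorem binary_iff_counts (row : List Int) :
    (row.all (fun x => x == 0 || x == 1) = true) ↔ row.count 0 + row.count 1 = row.length := by
  induction row with
  | nil => simp
  | cons n rest ih =>
    have hle := counts_le rest
    by_cases h0 : n = 0
    · subst h0; simp [ih]; omega
    · by_cases h1 : n = 1
      · subst h1; simp [ih]; omega
      · simp [h0, h1]
        omega

theorem twoOnesInARow_eq (matrix : List (List Int)) :
    twoOnesInARow matrix = twoOnesInARow_alt matrix := by
  induction matrix with
  | nil => rfl
  | cons row rest ih =>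
    simp only [twoOnesInARow, twoOnesInARow_alt, List.all_cons, pvCountOnes_char,
      PySem.List.count_eq, ih]
    by_cases hb : (row.all fun x => x == 0 || x == 1) = true
    · have hc := (binary_iff_counts row).mp hb
      simp only [hb, if_pos]
      by_cases h2 : (row.count 1 : Int) = 2
      · have : (row.count 0 : Int) = (row.length : Int) - 2 := by omega
        simp [h2, this]
      · simp [h2]
    · have hc : ¬ (row.count 0 + row.count 1 = row.length) := fun h => hb ((binary_iff_counts row).mpr h)
      simp only [hb]
      by_cases h2 : (row.count 1 : Int) = 2
      · have : ¬ ((row.count 0 : Int) = (row.length : Int) - 2) := by omega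
        simp [h2, this]
      · simp [h2]

-- ===== VERDICT =====
theorem twoOnesInARow_spec : Claim_equal_twoOnesInARow := by
  intro matrix _
  exact twoOnesInARow_eq matrix
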